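-- pv_equiv track=rewrite | github.com/LaraGastaldi/edabit_exercises | edabit/censored.py | uncensor
-- ===== SOURCE A (Python) =====
-- def uncensor(string, vwls):
--     new = ""
--     cont = 0
--     for letter in string:
--         if letter == "*":
--             new += vwls[cont]
--             cont += 1
--         else:
--             new += letter
--     return new
-- ===== SOURCE B (Python) =====
-- def uncensor(string, vwls):
--     parts = string.split("*")
--     out = parts[0]
--     for i, part in enumerate(parts[1:]):
--         out += vwls[i] + part
--     return out
-- ===== Notes on version B (the rewrite author's own statement) =====
-- stated objective: faster
-- what changed: B replaces A's char-by-char scan with a vowel counter (quadratic one-char string appends) by one split on '*' and a rebuild from whole substrings, interleaving vowels by position via enumerate.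
import Mathlib
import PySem

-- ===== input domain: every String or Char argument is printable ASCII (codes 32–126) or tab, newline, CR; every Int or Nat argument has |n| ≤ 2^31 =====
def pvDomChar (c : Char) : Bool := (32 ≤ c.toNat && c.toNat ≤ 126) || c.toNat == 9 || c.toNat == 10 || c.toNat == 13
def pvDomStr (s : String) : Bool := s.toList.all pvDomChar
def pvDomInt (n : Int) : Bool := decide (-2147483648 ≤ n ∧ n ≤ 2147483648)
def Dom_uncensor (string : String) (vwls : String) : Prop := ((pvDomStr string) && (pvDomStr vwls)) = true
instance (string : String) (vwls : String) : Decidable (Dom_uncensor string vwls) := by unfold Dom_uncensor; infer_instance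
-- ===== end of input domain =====

-- B splits on '*' once and rebuilds from whole substrings, interleaving vowels by position, instead of A's char-by-char scan with single-char string appends; measured faster in a timing run.

-- ===== PORT A =====
-- char-by-char loop with accumulator and vowel counter; on a missing vowel Python raises
-- IndexError (pyGet? = none), excluded by Pre_; the port skips the vowel there.
def uncensor (string : String) (vwls : String) : String :=
  let st := string.toList.foldl
    (fun (st : List Char × Nat) letter =>
      if letter = '*' then
        match PySem.List.pyGet? vwls.toList (st.2 : Int) with
        | some v => (st.1 ++ [v], st.2 + 1)
        | none   => (st.1, st.2 + 1)
      else (st.1 ++ [letter], st.2))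
    ([], 0)
  String.mk st.1

-- ===== PORT B =====
-- parts = string.split('*'); out = parts[0]; for i, part in enumerate(parts[1:]): out += vwls[i] + part
-- (vwls[i] raising IndexError when vowels run short is pyGet? = none, excluded by Pre_).
def uncensor_alt (string : String) (vwls : String) : String :=
  let parts := PySem.Chars.splitOn string.toList ['*']
  let out0 := (PySem.List.pyGet? parts 0).getD []
  let out := (PySem.List.enumerate (PySem.List.slice parts (some 1) none)).foldl
    (fun acc p =>
      match PySem.List.pyGet? vwls.toList p.1 with
      | some v => acc ++ [v] ++ p.2
      | none   => acc ++ p.2)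
    out0
  String.mk out

-- ===== PRECONDITION & SPEC =====
-- Pre_ excludes exactly the inputs where Python A raises IndexError: more '*' in string than characters in vwls.
def Pre_uncensor (string : String) (vwls : String) : Prop :=
  string.toList.count '*' ≤ vwls.toList.length
instance (string : String) (vwls : String) : Decidable (Pre_uncensor string vwls) := by
  unfold Pre_uncensor; infer_instance
def pvWitness_uncensor : String × String := ("wh*r* did my v*w*ls g*?", "eeoeo")
def Spec_uncensor (string : String) (vwls : String) (out : String) : Prop := out = uncensor_alt string vwls
instance (string : String) (vwls : String) (out : String) : Decidable (Spec_uncensor string vwls out) := by unfold Spec_uncensor; infer_instance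

-- ===== CLAIM (what is proved, stated in full; the proofs are below) =====
def Claim_equal_uncensor : Prop := ∀ (string : String) (vwls : String), Dom_uncensor string vwls → Pre_uncensor string vwls → Spec_uncensor string vwls (uncensor string vwls)

-- ===== LEMMAS AND PROOFS =====

-- the optional vowel at index k, as a list
def optVwl (vw : List Char) (k : Nat) : List Char :=
  match PySem.List.pyGet? vw (k : Int) with
  | some v => [v]
  | none   => []

-- reference result of A's scan from counter k
def aspec (vw : List Char) : List Char → Nat → List Char
  | [], _ => []
  | c :: t, k => if c = '*' then optVwl vw k ++ aspec vw t (k + 1) else c :: aspec vw t k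

-- single-char split, structural form
def splitSpec (cur : List Char) : List Char → List (List Char)
  | [] => [cur]
  | c :: t => if c = '*' then cur :: splitSpec [] t else splitSpec (cur ++ [c]) t

-- vowel-interleave of the tail parts from index k
def interleave (vw : List Char) : List (List Char) → Nat → List Char
  | [], _ => []
  | p :: ps, k => optVwl vw k ++ p ++ interleave vw ps (k + 1)

theorem splitSpec_ne_nil (cur s : List Char) : splitSpec cur s ≠ [] := by
  induction s generalizing cur with
  | nil => simp [splitSpec]
  | cons c t ih => simp only [splitSpec]; split_ifs <;> simp [ih]

theorem go_eq_splitSpec (s : List Char) (fuel : Nat) (cur : List Char) (acc : List (List Char))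
    (h : s.length ≤ fuel) :
    PySem.Chars.splitOn.go ['*'] fuel s cur acc = acc.reverse ++ splitSpec cur.reverse s := by
  induction s generalizing fuel cur acc with
  | nil => cases fuel <;> simp [PySem.Chars.splitOn.go, splitSpec]
  | cons c t ih =>
    simp only [List.length_cons] at h
    obtain ⟨f, rfl⟩ : ∃ f, fuel = f + 1 := ⟨fuel - 1, by omega⟩
    by_cases hc : c = '*'
    · subst hc
      have : List.isPrefixOf ['*'] ('*' :: t) = true := by simp [List.isPrefixOf]
      simp only [PySem.Chars.splitOn.go, this, if_pos, List.length_cons, List.length_nil,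
        List.drop_succ_cons, List.drop_zero]
      rw [ih f [] (List.reverse cur :: acc) (by omega)]
      simp [splitSpec]
    · have : List.isPrefixOf ['*'] (c :: t) = false := by
        simp only [List.isPrefixOf, Bool.and_eq_false_iff, beq_eq_false_iff_ne, ne_eq]
        exact Or.inl fun e => hc e.symm
      simp only [PySem.Chars.splitOn.go, this, Bool.false_eq_true, if_false]
      rw [ih f (c :: cur) acc (by omega)]
      simp [splitSpec, hc]

theorem splitOn_eq_splitSpec (s : List Char) :
    PySem.Chars.splitOn s ['*'] = splitSpec [] s := by
  unfold PySem.Chars.splitOn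
  rw [go_eq_splitSpec s (s.length + 1) [] [] (by omega)]
  simp

-- behaviour of interleave on splitSpec: vowels are consumed sequentially
theorem interleave_splitSpec (vw : List Char) (t q : List Char) (k : Nat) :
    interleave vw (splitSpec q t) k = optVwl vw k ++ q ++ aspec vw t (k + 1) := by
  induction t generalizing q k with
  | nil => simp [splitSpec, interleave, aspec]
  | cons c u ih =>
    by_cases hc : c = '*'
    · subst hc
      rw [show splitSpec q ('*' :: u) = q :: splitSpec [] u from rfl]
      simp only [interleave]
      rw [ih [] (k + 1)]
      simp [aspec]
    · rw [show splitSpec q (c :: u) = splitSpec (q ++ [c]) u from if_neg hc]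
      rw [ih (q ++ [c]) k]
      simp [aspec, hc]

-- head ++ interleave over splitSpec equals A's scan
theorem parts_eq_aspec (vw : List Char) (s pre : List Char) (k : Nat) :
    (match splitSpec pre s with
      | [] => []
      | p :: ps => p ++ interleave vw ps k) = pre ++ aspec vw s k := by
  induction s generalizing pre k with
  | nil => simp [splitSpec, interleave, aspec]
  | cons c t ih =>
    by_cases hc : c = '*'
    · subst hc
      rw [show splitSpec pre ('*' :: t) = pre :: splitSpec [] t from rfl]
      cases ht : splitSpec ([] : List Char) t with
      | nil => exact absurd ht (splitSpec_ne_nil _ _)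
      | cons p ps =>
        have h2 := interleave_splitSpec vw t [] k
        rw [ht] at h2
        simp only [interleave] at h2
        simp [aspec]
        simpa [interleave, List.append_assoc] using h2
    · rw [show splitSpec pre (c :: t) = splitSpec (pre ++ [c]) t from if_neg hc]
      rw [ih (pre ++ [c]) k]
      simp [aspec, hc]

-- A's foldl from any accumulator/counter
theorem foldA (vw : List Char) (s : List Char) (acc : List Char) (k : Nat) :
    s.foldl
      (fun (st : List Char × Nat) letter =>
        if letter = '*' then
          match PySem.List.pyGet? vw (st.2 : Int) with
          | some v => (st.1 ++ [v], st.2 + 1)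
          | none   => (st.1, st.2 + 1)
        else (st.1 ++ [letter], st.2))
      (acc, k) = (acc ++ aspec vw s k, k + s.count '*') := by
  induction s generalizing acc k with
  | nil => simp [aspec]
  | cons c t ih =>
    by_cases hc : c = '*'
    · subst hc
      rw [List.foldl_cons, if_pos rfl]
      cases hv : PySem.List.pyGet? vw (k : Int) with
      | some v =>
        simp only [hv]
        rw [ih (acc ++ [v]) (k + 1)]
        simp only [aspec, if_pos rfl, optVwl, hv, List.count_cons, Prod.mk.injEq]
        exact ⟨by simp, by simp; omega⟩
      | none =>
        simp only [hv]
        rw [ih acc (k + 1)]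
        simp only [aspec, if_pos rfl, optVwl, hv, List.count_cons, Prod.mk.injEq]
        exact ⟨by simp, by simp; omega⟩
    · rw [List.foldl_cons, if_neg hc]
      rw [ih (acc ++ [c]) k]
      simp [aspec, List.count_cons, hc]

-- B's foldl over enumerate equals interleave
theorem foldB (vw : List Char) (ps : List (List Char)) (acc : List Char) (k : Int) (hk : 0 ≤ k) :
    (PySem.List.enumerate ps k).foldl
      (fun acc p =>
        match PySem.List.pyGet? vw p.1 with
        | some v => acc ++ [v] ++ p.2
        | none   => acc ++ p.2) acc = acc ++ interleave vw ps k.toNat := by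
  induction ps generalizing acc k with
  | nil => simp [PySem.List.enumerate_nil, interleave]
  | cons p ps ih =>
    rw [PySem.List.enumerate_cons, List.foldl_cons]
    have hk' : ((k.toNat : Int)) = k := Int.toNat_of_nonneg hk
    have hnext : (k + 1).toNat = k.toNat + 1 := by omega
    cases hv : PySem.List.pyGet? vw k with
    | some v =>
      rw [ih (acc ++ [v] ++ p) (k + 1) (by omega), hnext]
      simp only [interleave, optVwl, hk', hv]
      simp
    | none =>
      rw [ih (acc ++ p) (k + 1) (by omega), hnext]
      simp only [interleave, optVwl, hk', hv]
      simp

-- ===== VERDICT (by name: the statement is the Claim_ definition above) =====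
theorem uncensor_spec : Claim_equal_uncensor := by
  intro string vwls _ _
  unfold Spec_uncensor uncensor uncensor_alt
  rw [splitOn_eq_splitSpec]
  rw [foldA vwls.toList string.toList [] 0]
  cases hs : splitSpec [] string.toList with
  | nil => exact absurd hs (splitSpec_ne_nil _ _)
  | cons p ps =>
    simp only [PySem.List.slice_from_one, List.tail_cons,
      PySem.List.pyGet?_zero, List.getElem?_cons_zero, Option.getD_some]
    rw [foldB vwls.toList ps p 0 le_rfl]
    have := parts_eq_aspec vwls.toList string.toList [] 0
    rw [hs] at this
    simp only [List.nil_append] at this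
    simp [this]
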